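-- pv_equiv track=rewrite | github.com/Puffinme/Fiddler-MCP-Server | enhanced-bridge.py | identify_domain_purposes
-- ===== SOURCE A (Python) =====
-- from typing import Dict, Any, List
--
-- def identify_domain_purposes(sessions: List[Dict]) -> List[str]:
--     """Identify what the domain is used for based on traffic patterns"""
--     purposes = []
--
--     urls = [session.get("url", "") for session in sessions]
--     all_urls = " ".join(urls)
--
--     if any("/api/" in url for url in urls):
--         purposes.append("API service")
--     if any("analytics" in url or "track" in url for url in urls):
--         purposes.append("Analytics/Tracking")
--     if any(".js" in url for url in urls):
--         purposes.append("JavaScript hosting")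
--     if any("cdn" in url for url in urls):
--         purposes.append("Content delivery")
--     if any("auth" in url or "login" in url for url in urls):
--         purposes.append("Authentication")
--
--     return purposes
-- ===== SOURCE B (Python) =====
-- from typing import Dict, Any, List
--
-- def identify_domain_purposes(sessions: List[Dict]) -> List[str]:
--     """Identify what the domain is used for based on traffic patterns"""
--     is_api = is_analytics = is_js = is_cdn = is_auth = False
--     for session in sessions:
--         url = session.get("url", "")
--         is_api = is_api or "/api/" in url
--         is_analytics = is_analytics or "analytics" in url or "track" in url
--         is_js = is_js or ".js" in url
--         is_cdn = is_cdn or "cdn" in url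
--         is_auth = is_auth or "auth" in url or "login" in url
--     flags_labels = [(is_api, "API service"),
--                     (is_analytics, "Analytics/Tracking"),
--                     (is_js, "JavaScript hosting"),
--                     (is_cdn, "Content delivery"),
--                     (is_auth, "Authentication")]
--     return [label for flag, label in flags_labels if flag]
-- ===== Notes on version B (the rewrite author's own statement) =====
-- stated objective: simpler
-- what changed: Replaces five separate any()-scans over a materialized url list (plus a dead ' '.join) with one pass over sessions maintaining five boolean flags, then a comprehension over a (flag, label) table.
import Mathlib
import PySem

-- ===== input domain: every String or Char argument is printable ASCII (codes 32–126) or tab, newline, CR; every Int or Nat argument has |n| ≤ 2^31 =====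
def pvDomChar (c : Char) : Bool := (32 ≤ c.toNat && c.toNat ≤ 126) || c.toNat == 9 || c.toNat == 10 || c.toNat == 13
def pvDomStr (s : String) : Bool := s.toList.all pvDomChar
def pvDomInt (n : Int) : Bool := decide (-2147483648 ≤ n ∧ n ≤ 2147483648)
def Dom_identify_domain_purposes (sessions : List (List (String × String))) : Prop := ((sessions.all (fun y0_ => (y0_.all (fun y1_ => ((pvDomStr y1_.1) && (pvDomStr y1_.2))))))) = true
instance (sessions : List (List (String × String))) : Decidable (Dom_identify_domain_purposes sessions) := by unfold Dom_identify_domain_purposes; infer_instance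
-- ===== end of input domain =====

-- B replaces A's five separate any()-scans over the url list (and a dead join) with one
-- pass over sessions maintaining five boolean flags, then a (flag, label) table filter: simpler.


-- ===== PORT A =====
def identify_domain_purposes (sessions : List (List (String × String))) : List String :=
  let purposes : List String := []
  let urls := sessions.map (fun session => (PySem.Dict.mk session).getD "url" "")
  let _all_urls := PySem.Str.join " " urls
  let purposes := if urls.any (fun url => PySem.Str.isIn "/api/" url) then purposes ++ ["API service"] else purposes
  let purposes := if urls.any (fun url => PySem.Str.isIn "analytics" url || PySem.Str.isIn "track" url) then purposes ++ ["Analytics/Tracking"] else purposes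
  let purposes := if urls.any (fun url => PySem.Str.isIn ".js" url) then purposes ++ ["JavaScript hosting"] else purposes
  let purposes := if urls.any (fun url => PySem.Str.isIn "cdn" url) then purposes ++ ["Content delivery"] else purposes
  let purposes := if urls.any (fun url => PySem.Str.isIn "auth" url || PySem.Str.isIn "login" url) then purposes ++ ["Authentication"] else purposes
  purposes

-- ===== PORT B =====
def identify_domain_purposes_alt (sessions : List (List (String × String))) : List String :=
  let f := sessions.foldl
    (fun (f : Bool × Bool × Bool × Bool × Bool) session =>
      let url := (PySem.Dict.mk session).getD "url" ""
      (f.1 || PySem.Str.isIn "/api/" url,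
       f.2.1 || PySem.Str.isIn "analytics" url || PySem.Str.isIn "track" url,
       f.2.2.1 || PySem.Str.isIn ".js" url,
       f.2.2.2.1 || PySem.Str.isIn "cdn" url,
       f.2.2.2.2 || PySem.Str.isIn "auth" url || PySem.Str.isIn "login" url))
    (false, false, false, false, false)
  let flags_labels : List (Bool × String) :=
    [(f.1, "API service"), (f.2.1, "Analytics/Tracking"), (f.2.2.1, "JavaScript hosting"),
     (f.2.2.2.1, "Content delivery"), (f.2.2.2.2, "Authentication")]
  (flags_labels.filter (fun p => p.1)).map (fun p => p.2)

-- ===== PRECONDITION & SPEC =====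
def Spec_identify_domain_purposes (sessions : List (List (String × String))) (out : List String) : Prop := out = identify_domain_purposes_alt sessions
instance (sessions : List (List (String × String))) (out : List String) : Decidable (Spec_identify_domain_purposes sessions out) := by unfold Spec_identify_domain_purposes; infer_instance

-- ===== CLAIM (what is proved, stated in full; the proofs are below) =====
def Claim_equal_identify_domain_purposes : Prop := ∀ (sessions : List (List (String × String))), Dom_identify_domain_purposes sessions → Spec_identify_domain_purposes sessions (identify_domain_purposes sessions)

-- ===== LEMMAS AND PROOFS =====

-- the flag fold computes, componentwise, "initial flag or some url matches"
theorem pv_flags_eq (sessions : List (List (String × String))) (a b c d e : Bool) :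
    sessions.foldl
      (fun (f : Bool × Bool × Bool × Bool × Bool) session =>
        let url := (PySem.Dict.mk session).getD "url" ""
        (f.1 || PySem.Str.isIn "/api/" url,
         f.2.1 || PySem.Str.isIn "analytics" url || PySem.Str.isIn "track" url,
         f.2.2.1 || PySem.Str.isIn ".js" url,
         f.2.2.2.1 || PySem.Str.isIn "cdn" url,
         f.2.2.2.2 || PySem.Str.isIn "auth" url || PySem.Str.isIn "login" url))
      (a, b, c, d, e)
    = (a || (sessions.map (fun s => (PySem.Dict.mk s).getD "url" "")).any (fun url => PySem.Str.isIn "/api/" url),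
       b || (sessions.map (fun s => (PySem.Dict.mk s).getD "url" "")).any (fun url => PySem.Str.isIn "analytics" url || PySem.Str.isIn "track" url),
       c || (sessions.map (fun s => (PySem.Dict.mk s).getD "url" "")).any (fun url => PySem.Str.isIn ".js" url),
       d || (sessions.map (fun s => (PySem.Dict.mk s).getD "url" "")).any (fun url => PySem.Str.isIn "cdn" url),
       e || (sessions.map (fun s => (PySem.Dict.mk s).getD "url" "")).any (fun url => PySem.Str.isIn "auth" url || PySem.Str.isIn "login" url)) := by
  induction sessions generalizing a b c d e with
  | nil => simp
  | cons s t ih =>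
      simp only [List.foldl_cons, List.map_cons, List.any_cons, ih]
      simp [Bool.or_assoc]

-- ===== VERDICT (by name: the statement is the Claim_ definition above) =====
theorem identify_domain_purposes_spec : Claim_equal_identify_domain_purposes := by
  intro sessions _
  unfold Spec_identify_domain_purposes identify_domain_purposes identify_domain_purposes_alt
  simp only [pv_flags_eq, Bool.false_or]
  generalize (sessions.map (fun s => (PySem.Dict.mk s).getD "url" "")).any (fun url => PySem.Str.isIn "/api/" url) = b1
  generalize (sessions.map (fun s => (PySem.Dict.mk s).getD "url" "")).any (fun url => PySem.Str.isIn "analytics" url || PySem.Str.isIn "track" url) = b2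
  generalize (sessions.map (fun s => (PySem.Dict.mk s).getD "url" "")).any (fun url => PySem.Str.isIn ".js" url) = b3
  generalize (sessions.map (fun s => (PySem.Dict.mk s).getD "url" "")).any (fun url => PySem.Str.isIn "cdn" url) = b4
  generalize (sessions.map (fun s => (PySem.Dict.mk s).getD "url" "")).any (fun url => PySem.Str.isIn "auth" url || PySem.Str.isIn "login" url) = b5
  cases b1 <;> cases b2 <;> cases b3 <;> cases b4 <;> cases b5 <;> rfl
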